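-- pv_equiv track=rewrite | github.com/inudev3/Algo-study | BOJ/1790.py | calc
-- ===== SOURCE A (Python) =====
-- def calc(n):
--     start = 1
--     length = 1
--     ans = 0
--     while start <= n:
--         end = start * 10 - 1
--         if end > n:
--             end = n
--         ans += (end - start + 1) * length
--         start *= 10
--         length += 1
--     return ans
-- ===== SOURCE B (Python) =====
-- def calc(n):
--     if n < 1:
--         return 0
--     L = len(str(n))
--     return (n + 1) * L - (10 ** L - 1) // 9
-- ===== Notes on version B (the rewrite author's own statement) =====
-- stated objective: simpler
-- what changed: Replaces the per-digit-band while loop with a guard plus a closed-form arithmetic expression in n and the decimal length of n (repunit subtraction), no loop over bands.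
import Mathlib
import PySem

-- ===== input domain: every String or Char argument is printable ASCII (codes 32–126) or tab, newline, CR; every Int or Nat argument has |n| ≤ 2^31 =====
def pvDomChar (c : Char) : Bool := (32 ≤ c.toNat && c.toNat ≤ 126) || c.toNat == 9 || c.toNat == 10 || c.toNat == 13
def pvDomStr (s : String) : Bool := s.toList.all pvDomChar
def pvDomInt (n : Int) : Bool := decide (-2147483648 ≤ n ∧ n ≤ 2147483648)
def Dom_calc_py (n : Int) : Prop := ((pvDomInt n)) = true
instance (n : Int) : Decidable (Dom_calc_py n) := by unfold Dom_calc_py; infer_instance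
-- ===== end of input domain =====

-- B replaces A's per-digit-band loop by a guard plus a closed-form expression in n and the decimal length of n.


-- ===== PORT A =====
-- the while loop of A; the extra Prop argument only certifies termination (start is always ≥ 1)
def calcGo (n start length ans : Int) (hs : 1 ≤ start) : Int :=
  if _h : start ≤ n then
    let e := start * 10 - 1
    let e := if e > n then n else e
    calcGo n (start * 10) (length + 1) (ans + (e - start + 1) * length) (by omega)
  else
    ans
termination_by (n + 1 - start).toNat
decreasing_by omega

def calc_py (n : Int) : Int := calcGo n 1 1 0 (by omega)

-- ===== PORT B =====
def calc_py_alt (n : Int) : Int :=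
  if n < 1 then 0
  else
    let L : Int := PySem.Str.len (PySem.Int.toStr n)
    (n + 1) * L - PySem.Int.floordiv (10 ^ L.toNat - 1) 9

-- ===== PRECONDITION & SPEC =====
def Spec_calc_py (n : Int) (out : Int) : Prop := out = calc_py_alt n
instance (n : Int) (out : Int) : Decidable (Spec_calc_py n out) := by unfold Spec_calc_py; infer_instance

-- ===== CLAIM (what is proved, stated in full; the proofs are below) =====
def Claim_equal_calc_py : Prop := ∀ (n : Int), Dom_calc_py n → Spec_calc_py n (calc_py n)

-- ===== LEMMAS AND PROOFS =====

theorem calcGo_cast (n s s' l l' a : Int) (hs : s = s') (hl : l = l')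
    (h : 1 ≤ s) (h' : 1 ≤ s') : calcGo n s l a h = calcGo n s' l' a h' := by
  subst hs; subst hl; rfl

-- the repunit 0, 1, 11, 111, … = (10^m - 1)/9
def repu : Nat → Int
  | 0 => 0
  | m + 1 => 10 * repu m + 1

theorem nine_repu (m : Nat) : 9 * repu m = 10 ^ m - 1 := by
  induction m with
  | zero => simp [repu]
  | succ m ih => simp [repu, pow_succ]; linarith

-- exact digit count of Nat.toDigits (Mathlib only provides the upper bound)
theorem toDigitsCore_len_exact (f : Nat) : ∀ n : Nat, n < f →
    (Nat.toDigitsCore 10 f n []).length = Nat.log 10 n + 1 := by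
  induction f with
  | zero => intro n h; omega
  | succ f ih =>
    intro n hn
    simp only [Nat.toDigitsCore]
    by_cases h : n / 10 = 0
    · have : n < 10 := by omega
      simp [h, Nat.log_eq_zero_iff, this]
    · simp only [h, if_false]
      rw [Nat.toDigitsCore_lens_eq, ih (n / 10) (by omega)]
      have h10 : 10 ≤ n := by omega
      rw [Nat.log_div_base]
      have : 1 ≤ Nat.log 10 n := Nat.le_log_of_pow_le (by norm_num) (by simpa using h10)
      omega

theorem toDigits_len_exact (n : Nat) :
    (Nat.toDigits 10 n).length = Nat.log 10 n + 1 :=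
  toDigitsCore_len_exact (n + 1) n (by omega)

theorem str_len_of_pos (n : Int) (h : 1 ≤ n) :
    PySem.Str.len (PySem.Int.toStr n) = ((Nat.log 10 n.toNat : Nat) : Int) + 1 := by
  have hneg : ¬ n < 0 := by omega
  simp only [PySem.Str.len, PySem.Int.toStr, PySem.Int.toChars, hneg, if_false]
  rw [show (String.ofList (Nat.toDigits 10 n.toNat)).toList = Nat.toDigits 10 n.toNat from String.toList_ofList]
  rw [toDigits_len_exact]
  push_cast; ring

theorem log_band (k : Nat) (n : Int) (h1 : (10:Int) ^ k ≤ n) (h2 : n < 10 ^ (k + 1)) :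
    Nat.log 10 n.toNat = k := by
  have hk : ((10:Nat) ^ k : Int) ≤ n := by push_cast; exact h1
  have hk1 : n < ((10:Nat) ^ (k+1) : Int) := by push_cast; exact h2
  have hpos : (0:Int) < 10 ^ k := by positivity
  refine Nat.log_eq_of_pow_le_of_lt_pow ?_ ?_ <;> omega

-- the last iteration of A's loop: start = 10^k with 10^k ≤ n < 10^(k+1)
theorem go_top (k : Nat) (n ans : Int) (hp : 1 ≤ (10:Int) ^ k)
    (h1 : (10:Int) ^ k ≤ n) (h2 : n < 10 ^ (k + 1)) :
    calcGo n ((10:Int) ^ k) ((k : Int) + 1) ans hp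
      = ans + (n + 1) * ((Nat.log 10 n.toNat : Int) + 1)
          - repu (Nat.log 10 n.toNat + 1) - ((10:Int) ^ k * k - repu k) := by
  rw [log_band k n h1 h2]
  rw [calcGo]
  simp only [h1, dif_pos]
  rw [calcGo]
  have hstop : ¬ (10:Int) ^ k * 10 ≤ n := by
    intro hc; rw [pow_succ] at h2; omega
  simp only [hstop, dif_neg, not_false_iff]
  have h9 := nine_repu k
  by_cases he : (10:Int) ^ k * 10 - 1 > n
  · simp only [he, if_pos]
    simp only [repu]
    linear_combination h9
  · simp only [he, if_neg, not_false_iff]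
    have hn : n = (10:Int) ^ k * 10 - 1 := by rw [pow_succ] at h2; omega
    simp only [repu]
    rw [hn]
    linear_combination h9

-- the whole loop from start = 10^k computes total digits of 1..n minus those of 1..(10^k - 1)
theorem go_closed (d : Nat) : ∀ (k : Nat) (n ans : Int) (hp : 1 ≤ (10:Int) ^ k),
    (10:Int) ^ k ≤ n → n < 10 ^ (k + 1 + d) →
    calcGo n ((10:Int) ^ k) ((k : Int) + 1) ans hp
      = ans + (n + 1) * ((Nat.log 10 n.toNat : Int) + 1)
          - repu (Nat.log 10 n.toNat + 1) - ((10:Int) ^ k * k - repu k) := by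
  induction d with
  | zero => intro k n ans hp h1 h2; exact go_top k n ans hp h1 h2
  | succ d ih =>
    intro k n ans hp h1 h2
    by_cases hc : n < 10 ^ (k + 1)
    · exact go_top k n ans hp h1 hc
    · replace hc : 10 ^ (k + 1) ≤ n := by omega
      rw [calcGo]
      simp only [h1, dif_pos]
      have hne : ¬ (10:Int) ^ k * 10 - 1 > n := by rw [pow_succ] at hc; omega
      simp only [hne, if_neg, not_false_iff]
      rw [calcGo_cast n ((10:Int) ^ k * 10) ((10:Int) ^ (k + 1)) (((k : Int) + 1) + 1)
            (((k + 1 : Nat) : Int) + 1) _ (pow_succ 10 k).symm (by push_cast; ring) _ (by exact one_le_pow₀ (by norm_num))]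
      rw [ih (k + 1) n _ (by exact one_le_pow₀ (by norm_num)) hc (by
        have : k + 1 + 1 + d = k + 1 + (d + 1) := by omega
        rw [this]; exact h2)]
      have h9 := nine_repu k
      simp only [repu, pow_succ]
      push_cast
      linear_combination h9

theorem floordiv_repu (m : Nat) :
    PySem.Int.floordiv (10 ^ m - 1) 9 = repu m := by
  rw [PySem.Int.floordiv_eq_ediv_of_pos (by norm_num)]
  have h9 := nine_repu m
  omega

-- ===== VERDICT (by name: the statement is the Claim_ definition above) =====
theorem calc_py_spec : Claim_equal_calc_py := by
  intro n hDom
  unfold Spec_calc_py calc_py calc_py_alt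
  by_cases hn : n < 1
  · rw [calcGo]
    simp only [show ¬ (1:Int) ≤ n by omega, dif_neg, not_false_iff]
    simp [hn]
  · replace hn : 1 ≤ n := by omega
    simp only [show ¬ n < 1 by omega, if_neg, not_false_iff]
    have hdom : n ≤ 2147483648 := by
      have := of_decide_eq_true hDom
      omega
    have h2 : n < 10 ^ (0 + 1 + 9) := by norm_num; omega
    have h1 : (10:Int) ^ 0 ≤ n := by simpa using hn
    have hgo := go_closed 9 0 n 0 (by norm_num) h1 h2
    rw [calcGo_cast n 1 ((10:Int) ^ 0) 1 (((0 : Nat) : Int) + 1) 0 (by norm_num) (by norm_num)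
          (by omega) (by norm_num), hgo]
    rw [str_len_of_pos n hn]
    have hL : (((Nat.log 10 n.toNat : Nat) : Int) + 1).toNat = Nat.log 10 n.toNat + 1 := by omega
    rw [hL, floordiv_repu]
    simp [repu]
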